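-- pv_equiv track=rewrite | github.com/Kasiet2001/leetcode | people_whose_list_of_fav_companies.py | peopleIndexes
-- ===== SOURCE A (Python) =====
-- def peopleIndexes(favoriteCompanies):
--     ans = []
--     fc = [set(i) for i in favoriteCompanies]
--     for i, s1 in enumerate(fc):
--         c = 0
--         for j, s2 in enumerate(fc):
--             if i != j:
--                 if s1.issubset(s2) == False:
--                     c += 1
--         if c == len(favoriteCompanies) - 1:
--             ans.append(i)
--     return ans
-- ===== SOURCE B (Python) =====
-- def peopleIndexes(favoriteCompanies):
--     n = len(favoriteCompanies)
--     owners = {}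
--     for i, comps in enumerate(favoriteCompanies):
--         for c in comps:
--             owners[c] = owners.get(c, set()) | {i}
--     ans = []
--     for i, comps in enumerate(favoriteCompanies):
--         cand = set(range(n))
--         for c in comps:
--             cand &= owners.get(c, set())
--         if cand == {i}:
--             ans.append(i)
--     return ans
-- ===== Notes on version B (the rewrite author's own statement) =====
-- stated objective: alternative
-- what changed: B replaces A's all-pairs subset counting (compare every person's set against every other person's set) by a one-pass inverted index company -> set of holders; person i is kept iff the intersection of the holder sets of i's companies is exactly {i}.
import Mathlib
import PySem

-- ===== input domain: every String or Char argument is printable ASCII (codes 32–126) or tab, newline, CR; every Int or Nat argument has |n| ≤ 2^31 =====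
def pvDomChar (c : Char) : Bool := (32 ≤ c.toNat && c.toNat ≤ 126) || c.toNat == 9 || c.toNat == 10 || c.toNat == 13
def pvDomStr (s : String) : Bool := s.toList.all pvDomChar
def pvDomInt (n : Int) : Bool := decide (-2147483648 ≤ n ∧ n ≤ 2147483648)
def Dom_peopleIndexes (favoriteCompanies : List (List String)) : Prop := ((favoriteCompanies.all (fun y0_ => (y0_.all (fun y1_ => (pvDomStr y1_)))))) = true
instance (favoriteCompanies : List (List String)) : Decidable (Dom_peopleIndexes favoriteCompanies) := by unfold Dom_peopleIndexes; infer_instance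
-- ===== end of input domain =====

-- B replaces A's all-pairs subset counting by an inverted index companies → set of holders:
-- person i is kept iff the intersection of the holder sets of i's companies is exactly {i}.

-- ===== PORT A =====
def peopleIndexes (favoriteCompanies : List (List String)) : List Int :=
  let fc := favoriteCompanies.map (fun i => PySem.Set.ofList i)
  (PySem.List.enumerate fc).foldl (fun ans p =>
    let c := (PySem.List.enumerate fc).foldl (fun c q =>
      if p.1 ≠ q.1 then
        if PySem.Set.issubset p.2 q.2 = false then c + 1 else c
      else c) (0 : Int)
    if c = (favoriteCompanies.length : Int) - 1 then ans ++ [p.1] else ans) []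

-- ===== PORT B =====
def peopleIndexes_alt (favoriteCompanies : List (List String)) : List Int :=
  let n : Int := (favoriteCompanies.length : Int)
  let owners : PySem.Dict String (PySem.Set Int) :=
    (PySem.List.enumerate favoriteCompanies).foldl (fun d p =>
      p.2.foldl (fun d c =>
        d.insert c (PySem.Set.union (d.getD c PySem.Set.empty) (PySem.Set.ofList [p.1]))) d)
      PySem.Dict.empty
  (PySem.List.enumerate favoriteCompanies).foldl (fun ans p =>
    let cand := p.2.foldl (fun cand c => PySem.Set.inter cand (owners.getD c PySem.Set.empty))
      (PySem.Set.ofList (PySem.List.pyRange 0 n 1))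
    if PySem.Set.equal cand (PySem.Set.ofList [p.1]) then ans ++ [p.1] else ans) []

-- ===== PRECONDITION & SPEC =====
def Spec_peopleIndexes (favoriteCompanies : List (List String)) (out : List Int) : Prop := out = peopleIndexes_alt favoriteCompanies
instance (favoriteCompanies : List (List String)) (out : List Int) : Decidable (Spec_peopleIndexes favoriteCompanies out) := by unfold Spec_peopleIndexes; infer_instance

-- ===== CLAIM (what is proved, stated in full; the proofs are below) =====
def Claim_equal_peopleIndexes : Prop := ∀ (favoriteCompanies : List (List String)), Dom_peopleIndexes favoriteCompanies → Spec_peopleIndexes favoriteCompanies (peopleIndexes favoriteCompanies)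

-- ===== LEMMAS AND PROOFS =====

-- membership in the holder set after the inner loop over one person's company list
theorem pvInnerOwners (comps : List String) (i : Int) (d : PySem.Dict String (PySem.Set Int))
    (c : String) (x : Int) :
    x ∈ (comps.foldl (fun d c' =>
        d.insert c' (PySem.Set.union (d.getD c' PySem.Set.empty) (PySem.Set.ofList [i]))) d).getD c PySem.Set.empty ↔
      x ∈ d.getD c PySem.Set.empty ∨ (c ∈ comps ∧ x = i) := by
  induction comps generalizing d with
  | nil => simp
  | cons c' rest ih =>
    simp only [List.foldl_cons, ih, PySem.Dict.getD_insert, List.mem_cons]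
    by_cases h : c = c' <;> simp [h, PySem.Set.mem_union, PySem.Set.mem_ofList] <;> tauto

-- membership in the holder set after the whole owners-building loop
theorem pvOwnersGetD (l : List (Int × List String)) (d : PySem.Dict String (PySem.Set Int))
    (c : String) (x : Int) :
    x ∈ (l.foldl (fun d p =>
        p.2.foldl (fun d c' =>
          d.insert c' (PySem.Set.union (d.getD c' PySem.Set.empty) (PySem.Set.ofList [p.1]))) d) d).getD c PySem.Set.empty ↔
      x ∈ d.getD c PySem.Set.empty ∨ ∃ p ∈ l, p.1 = x ∧ c ∈ p.2 := by
  induction l generalizing d with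
  | nil => simp
  | cons p rest ih =>
    simp only [List.foldl_cons, ih, pvInnerOwners, List.mem_cons]
    constructor
    · rintro ((h | ⟨hc, rfl⟩) | ⟨q, hq, rfl, hcq⟩)
      · exact Or.inl h
      · exact Or.inr ⟨p, Or.inl rfl, rfl, hc⟩
      · exact Or.inr ⟨q, Or.inr hq, rfl, hcq⟩
    · rintro (h | ⟨q, (rfl | hq), rfl, hcq⟩)
      · exact Or.inl (Or.inl h)
      · exact Or.inl (Or.inr ⟨hcq, rfl⟩)
      · exact Or.inr ⟨q, hq, rfl, hcq⟩

-- membership in the candidate intersection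
theorem pvCandMem (comps : List String) (d : PySem.Dict String (PySem.Set Int))
    (init : PySem.Set Int) (x : Int) :
    x ∈ comps.foldl (fun cand c => PySem.Set.inter cand (d.getD c PySem.Set.empty)) init ↔
      x ∈ init ∧ ∀ c ∈ comps, x ∈ d.getD c PySem.Set.empty := by
  induction comps generalizing init with
  | nil => simp
  | cons c rest ih =>
    simp only [List.foldl_cons, ih, PySem.Set.mem_inter, List.mem_cons]
    constructor
    · rintro ⟨⟨h1, h2⟩, h3⟩
      exact ⟨h1, fun c' hc' => hc'.elim (fun h => h ▸ h2) (h3 c')⟩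
    · rintro ⟨h1, h2⟩
      exact ⟨⟨h1, h2 c (Or.inl rfl)⟩, fun c' hc' => h2 c' (Or.inr hc')⟩

theorem pvTwoLeLength {α : Type} {a b : α} {l : List α} (ha : a ∈ l) (hb : b ∈ l)
    (hab : a ≠ b) : 2 ≤ l.length := by
  match l with
  | [] => simp at ha
  | [x] =>
    simp at ha hb
    exact absurd (ha.trans hb.symm) hab
  | x :: y :: t => simp

-- A's count equals n-1 iff the predicate holds for every other index
theorem pvCountPAll {α : Type} (l : List (Int × α)) (i : Int) (pred : Int × α → Prop)
    [DecidablePred pred]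
    (h1 : ∀ q ∈ l, pred q → q.1 ≠ i)
    (h2 : (l.map Prod.fst).Nodup)
    (hq : ∃ q ∈ l, q.1 = i) :
    (l.countP (fun q => decide (pred q)) = l.length - 1 ↔ ∀ q ∈ l, q.1 ≠ i → pred q) := by
  obtain ⟨qi, hqi, hqi1⟩ := hq
  have hone : l.countP (fun q => decide (q.1 = i)) = 1 := by
    have hmap : l.countP (fun q => decide (q.1 = i)) = (l.map Prod.fst).count i := by
      rw [List.count, List.countP_map]
      apply List.countP_congr
      intro q _; simp [beq_iff_eq]
    rw [hmap]
    exact List.count_eq_one_of_mem h2 (List.mem_map.2 ⟨qi, hqi, hqi1⟩)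
  have hlen1 : 1 ≤ l.length := List.length_pos_of_mem hqi
  constructor
  · intro hcnt q hql hqne
    by_contra hnp
    have hqine : ¬ pred qi := fun h => (h1 qi hqi h) hqi1
    have hne : q ≠ qi := fun h => hqne (h ▸ hqi1)
    have htwo : 2 ≤ l.countP (fun q => decide (¬ pred q)) := by
      rw [List.countP_eq_length_filter]
      exact pvTwoLeLength (by simp [List.mem_filter, hql, hnp])
        (by simp [List.mem_filter, hqi, hqine]) hne
    have e1 := List.length_eq_countP_add_countP (fun q => decide (pred q)) (l := l)
    simp only [Bool.decide_eq_true, decide_not] at e1 htwo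
    omega
  · intro hall
    have hcong : l.countP (fun q => decide (pred q)) = l.countP (fun q => !decide (q.1 = i)) := by
      apply List.countP_congr
      intro q hql
      by_cases h : q.1 = i
      · have hnp : ¬ pred q := fun hp => h1 q hql hp h
        simp [h, hnp]
      · simp [h, hall q hql h]
    have e1 := List.length_eq_countP_add_countP (fun q => decide (q.1 = i)) (l := l)
    simp only [Bool.decide_eq_true, decide_not] at e1
    omega

theorem pvEnumerateMap {α β : Type} (f : α → β) (l : List α) (s : Int) :
    PySem.List.enumerate (l.map f) s = (PySem.List.enumerate l s).map (fun p => (p.1, f p.2)) := by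
  induction l generalizing s with
  | nil => simp [PySem.List.enumerate_nil]
  | cons x t ih => simp [PySem.List.enumerate_cons, ih]

-- the per-index conditions of A and B agree
theorem pvCondIff (favs : List (List String)) (p : Int × List String)
    (hp : p ∈ PySem.List.enumerate favs 0) :
    ((0 : Int) + ((PySem.List.enumerate favs 0).countP (fun q =>
        decide (p.1 ≠ q.1 ∧ PySem.Set.issubset (PySem.Set.ofList p.2) (PySem.Set.ofList q.2) = false)) : Int)
      = (favs.length : Int) - 1)
    ↔ (∀ x : Int,
        ((x ∈ PySem.Set.ofList (PySem.List.pyRange 0 (favs.length : Int) 1)) ∧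
         ∀ c ∈ p.2, ∃ q ∈ PySem.List.enumerate favs 0, q.1 = x ∧ c ∈ q.2)
        ↔ x ∈ PySem.Set.ofList [p.1]) := by
  have hlenE : (PySem.List.enumerate favs 0).length = favs.length :=
    PySem.List.length_enumerate favs 0
  have hnodup : ((PySem.List.enumerate favs 0).map Prod.fst).Nodup := by
    rw [List.nodup_iff_pairwise_ne, List.pairwise_map]
    exact (PySem.List.pairwise_lt_enumerate favs 0).imp (fun h => ne_of_lt h)
  have hbound : ∀ q ∈ PySem.List.enumerate favs 0, 0 ≤ q.1 ∧ q.1 < (favs.length : Int) := by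
    intro q hq
    obtain ⟨k, hk, rfl⟩ := (PySem.List.mem_enumerate_iff _ _ _).1 hq
    constructor <;> simp <;> omega
  have hexists : ∀ x : Int, 0 ≤ x → x < (favs.length : Int) →
      ∃ q ∈ PySem.List.enumerate favs 0, q.1 = x := by
    intro x hx0 hxn
    have hk : x.toNat < favs.length := by omega
    refine ⟨((0 : Int) + (x.toNat : Int), favs[x.toNat]), ?_, by simp; omega⟩
    exact (PySem.List.mem_enumerate_iff _ _ _).2 ⟨x.toNat, hk, rfl⟩
  have huniq : ∀ q ∈ PySem.List.enumerate favs 0, ∀ q' ∈ PySem.List.enumerate favs 0,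
      q.1 = q'.1 → q = q' :=
    fun q hq q' hq' h => List.inj_on_of_nodup_map hnodup hq hq' h
  have hsub : ∀ q : Int × List String,
      (PySem.Set.issubset (PySem.Set.ofList p.2) (PySem.Set.ofList q.2) = false) ↔
        ¬ ∀ c ∈ p.2, c ∈ q.2 := by
    intro q
    rw [← Bool.not_eq_true, not_iff_not, PySem.Set.issubset_iff]
    simp [PySem.Set.mem_ofList]
  have hcount := pvCountPAll (PySem.List.enumerate favs 0) p.1
    (fun q => p.1 ≠ q.1 ∧ PySem.Set.issubset (PySem.Set.ofList p.2) (PySem.Set.ofList q.2) = false)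
    (fun q _ h => fun he => h.1 he.symm) hnodup ⟨p, hp, rfl⟩
  have hlen1 : 1 ≤ favs.length := by
    have := List.length_pos_of_mem hp; omega
  have hcast : ((0 : Int) + ((PySem.List.enumerate favs 0).countP (fun q =>
        decide (p.1 ≠ q.1 ∧ PySem.Set.issubset (PySem.Set.ofList p.2) (PySem.Set.ofList q.2) = false)) : Int)
      = (favs.length : Int) - 1)
      ↔ (PySem.List.enumerate favs 0).countP (fun q =>
        decide (p.1 ≠ q.1 ∧ PySem.Set.issubset (PySem.Set.ofList p.2) (PySem.Set.ofList q.2) = false))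
        = (PySem.List.enumerate favs 0).length - 1 := by
    rw [hlenE]; omega
  rw [hcast, hcount]
  constructor
  · -- A's condition → B's condition
    intro hA x
    constructor
    · rintro ⟨hxr, hall⟩
      rw [PySem.Set.mem_ofList, PySem.List.mem_pyRange_one] at hxr
      obtain ⟨q, hqE, hq1⟩ := hexists x hxr.1 (by simpa using hxr.2)
      by_contra hne
      rw [PySem.Set.mem_ofList, List.mem_singleton] at hne
      have hqnp : q.1 ≠ p.1 := by rw [hq1]; exact fun h => hne h
      have := hA q hqE hqnp
      simp only [hsub] at this
      apply this.2
      intro c hc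
      obtain ⟨q', hq'E, hq'1, hcq'⟩ := hall c hc
      have : q' = q := huniq q' hq'E q hqE (hq'1.trans hq1.symm)
      exact this ▸ hcq'
    · intro hx
      rw [PySem.Set.mem_ofList, List.mem_singleton] at hx
      subst hx
      refine ⟨?_, fun c hc => ⟨p, hp, rfl, hc⟩⟩
      rw [PySem.Set.mem_ofList, PySem.List.mem_pyRange_one]
      exact ⟨(hbound p hp).1, by simpa using (hbound p hp).2⟩
  · -- B's condition → A's condition
    intro hB q hqE hqne
    simp only [hsub]
    constructor
    · exact fun h => hqne h.symm
    · intro hs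
      apply hqne
      have := (hB q.1).1 ⟨?_, ?_⟩
      · rw [PySem.Set.mem_ofList, List.mem_singleton] at this; exact this
      · rw [PySem.Set.mem_ofList, PySem.List.mem_pyRange_one]
        exact ⟨(hbound q hqE).1, by simpa using (hbound q hqE).2⟩
      · exact fun c hc => ⟨q, hqE, rfl, hs c hc⟩

-- ===== VERDICT (by name: the statement is the Claim_ definition above) =====
theorem peopleIndexes_spec : Claim_equal_peopleIndexes := by
  intro favs _
  unfold Spec_peopleIndexes peopleIndexes peopleIndexes_alt
  simp only []
  rw [pvEnumerateMap]
  simp only [List.foldl_map]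
  rw [PySem.List.foldl_append_ite
    (p := fun p : Int × List String =>
      ((PySem.List.enumerate favs 0).foldl (fun c q =>
        if p.1 ≠ q.1 then
          if PySem.Set.issubset (PySem.Set.ofList p.2) (PySem.Set.ofList q.2) = false then c + 1 else c
        else c) (0 : Int)) = (favs.length : Int) - 1)
    (f := fun p : Int × List String => p.1)]
  rw [PySem.List.foldl_append_if
    (p := fun p : Int × List String =>
      PySem.Set.equal
        (p.2.foldl (fun cand c =>
          PySem.Set.inter cand
            (((PySem.List.enumerate favs 0).foldl (fun d p =>
              p.2.foldl (fun d c =>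
                d.insert c (PySem.Set.union (d.getD c PySem.Set.empty) (PySem.Set.ofList [p.1]))) d)
              PySem.Dict.empty).getD c PySem.Set.empty))
          (PySem.Set.ofList (PySem.List.pyRange 0 (favs.length : Int) 1)))
        (PySem.Set.ofList [p.1]))
    (f := fun p : Int × List String => p.1)]
  simp only [List.nil_append]
  congr 1
  apply List.filter_congr
  intro p hp
  have hstep : ∀ (acc : Int) (q : Int × List String), q ∈ PySem.List.enumerate favs 0 →
      (if p.1 ≠ q.1 then
        if PySem.Set.issubset (PySem.Set.ofList p.2) (PySem.Set.ofList q.2) = false then acc + 1 else acc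
      else acc)
      = (if (p.1 ≠ q.1 ∧ PySem.Set.issubset (PySem.Set.ofList p.2) (PySem.Set.ofList q.2) = false)
        then acc + 1 else acc) := by
    intro acc q _
    by_cases h1 : p.1 ≠ q.1
    · by_cases h2 : PySem.Set.issubset (PySem.Set.ofList p.2) (PySem.Set.ofList q.2) = false
      · simp [h1, h2]
      · simp [h1, h2]
    · simp [h1]
  rw [PySem.List.foldl_congr_mem _ _ _ _ hstep, PySem.List.foldl_ite_add_one]
  rw [Bool.eq_iff_iff]
  simp only [decide_eq_true_iff, PySem.Set.equal_iff]
  simp only [pvCandMem, pvOwnersGetD, PySem.Dict.getD_empty]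
  simp only [PySem.Set.empty, List.not_mem_nil, false_or]
  exact pvCondIff favs p hp
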